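-- pv_equiv track=rewrite | github.com/SachinthaGunathilaka/Fiverr-All-Projects | Python/student9000_/cusum.py | cusum
-- ===== SOURCE A (Python) =====
-- def cusum(conc_lpr):
--     conc_cusum = []
--     # calculate first value in conc_cusum
--     if conc_lpr[0] < 0:
--         conc_cusum.append(0)
--     else:
--         conc_cusum.append(conc_lpr[0])
--
--     # calculate other values in conc_cusum
--     for i in range(1, len(conc_lpr)):
--         # if the calculated value is negative replace it by 0
--         if conc_cusum[i - 1] + conc_lpr[i] < 0:
--             conc_cusum.append(0)
--         else:
--             conc_cusum.append(conc_cusum[i - 1] + conc_lpr[i])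
--
--     return conc_cusum
-- ===== SOURCE B (Python) =====
-- def cusum(conc_lpr):
--     # Stage 1: prefix sums S[i] = x[0] + ... + x[i]
--     prefix = []
--     s = 0
--     for x in conc_lpr:
--         s += x
--         prefix.append(s)
--     # Stage 2: running minimum of the prefix sums, clamped at 0
--     lows = []
--     low = 0
--     for s in prefix:
--         low = min(low, s)
--         lows.append(low)
--     # Stage 3: clamped CUSUM via the identity c[i] = S[i] - min(0, min_{j<=i} S[j])
--     return [s - low for s, low in zip(prefix, lows)]
-- ===== Notes on version B (the rewrite author's own statement) =====
-- stated objective: alternative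
-- what changed: Replaces A's clamped-recurrence loop (each output computed from the previous output read back by index) with three staged passes using the identity c[i] = S[i] - min(0, min_{j<=i} S[j]): prefix sums, then a running minimum, then an elementwise subtraction; no output element is ever read back.
import Mathlib
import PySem

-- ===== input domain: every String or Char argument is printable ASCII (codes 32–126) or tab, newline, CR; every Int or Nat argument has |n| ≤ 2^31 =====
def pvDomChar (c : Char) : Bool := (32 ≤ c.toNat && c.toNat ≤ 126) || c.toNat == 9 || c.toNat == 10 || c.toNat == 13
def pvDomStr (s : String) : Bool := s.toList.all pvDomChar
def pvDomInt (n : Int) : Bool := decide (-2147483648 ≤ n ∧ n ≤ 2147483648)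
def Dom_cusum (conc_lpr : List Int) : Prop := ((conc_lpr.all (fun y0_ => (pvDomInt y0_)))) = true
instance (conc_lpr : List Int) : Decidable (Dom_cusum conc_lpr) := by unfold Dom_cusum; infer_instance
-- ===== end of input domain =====

-- B computes the clamped CUSUM by staged passes (prefix sums, running minimum, subtraction) instead of A's read-back recurrence loop (alternative; same O(n)).
-- ===== PORT A =====
def cusum (conc_lpr : List Int) : List Int :=
  match PySem.List.pyGet? conc_lpr 0 with
  | none => []   -- conc_lpr[0] IndexError; excluded by Pre_cusum
  | some x0 =>
    let conc_cusum := if x0 < 0 then [(0 : Int)] else [x0]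
    (PySem.List.pyRange 1 (conc_lpr.length : Int) 1).foldl
      (fun acc i =>
        if PySem.List.pyGetD acc (i - 1) 0 + PySem.List.pyGetD conc_lpr i 0 < 0 then
          acc ++ [0]
        else
          acc ++ [PySem.List.pyGetD acc (i - 1) 0 + PySem.List.pyGetD conc_lpr i 0])
      conc_cusum

-- ===== PORT B =====
-- Stage 1 of Source B: prefix sums carried by accumulator s
def prefixSums (s : Int) : List Int → List Int
  | [] => []
  | x :: r => (s + x) :: prefixSums (s + x) r

-- Stage 2 of Source B: running minimum carried by accumulator low (starts at 0)
def runningMin (low : Int) : List Int → List Int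
  | [] => []
  | s :: r => (min low s) :: runningMin (min low s) r

def cusum_alt (conc_lpr : List Int) : List Int :=
  let pre := prefixSums 0 conc_lpr
  List.zipWith (fun s low => s - low) pre (runningMin 0 pre)

-- ===== PRECONDITION & SPEC =====
-- A raises IndexError (conc_lpr[0]) on the empty list; nothing else is excluded.
def Pre_cusum (conc_lpr : List Int) : Prop := conc_lpr ≠ []
instance (conc_lpr : List Int) : Decidable (Pre_cusum conc_lpr) := by unfold Pre_cusum; infer_instance
def pvWitness_cusum : List Int := [3, -5, 4, -1, -9, 2]

def Spec_cusum (conc_lpr : List Int) (out : List Int) : Prop := out = cusum_alt conc_lpr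
instance (conc_lpr : List Int) (out : List Int) : Decidable (Spec_cusum conc_lpr out) := by unfold Spec_cusum; infer_instance

-- ===== CLAIM (what is proved, stated in full; the proofs are below) =====
def Claim_equal_cusum : Prop := ∀ (conc_lpr : List Int), Dom_cusum conc_lpr → Pre_cusum conc_lpr → Spec_cusum conc_lpr (cusum conc_lpr)

-- ===== LEMMAS AND PROOFS =====

-- reference form both ports are reduced to: the clamped running scan
def accClamp (a : Int) : List Int → List Int
  | [] => []
  | b :: r => (max 0 (a + b)) :: accClamp (max 0 (a + b)) r

-- A's loop invariant: starting at index acc.length+1 with current list acc ++ [a],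
-- the for-loop appends exactly the clamped running sums of the remaining elements
lemma cusum_loop_inv (l : List Int) (ys acc : List Int) (a : Int)
    (h : l.drop (acc.length + 1) = ys) :
    (PySem.List.pyRange ((acc.length + 1 : Nat) : Int) (l.length : Int) 1).foldl
      (fun acc' i =>
        if PySem.List.pyGetD acc' (i - 1) 0 + PySem.List.pyGetD l i 0 < 0 then
          acc' ++ [0]
        else
          acc' ++ [PySem.List.pyGetD acc' (i - 1) 0 + PySem.List.pyGetD l i 0])
      (acc ++ [a])
    = acc ++ a :: accClamp a ys := by
  induction ys generalizing acc a with
  | nil =>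
    have hlen : l.length ≤ acc.length + 1 := by
      have := congrArg List.length h
      simp [List.length_drop] at this
      omega
    rw [PySem.List.pyRange_one_eq_nil (by exact_mod_cast hlen)]
    simp [accClamp]
  | cons b r ih =>
    have hlt : acc.length + 1 < l.length := by
      have := congrArg List.length h
      simp [List.length_drop] at this
      omega
    rw [PySem.List.pyRange_one_cons (by exact_mod_cast hlt)]
    simp only [List.foldl_cons]
    have hprev : PySem.List.pyGetD (acc ++ [a]) (((acc.length + 1 : Nat) : Int) - 1) 0 = a := by
      have : ((acc.length + 1 : Nat) : Int) - 1 = ((acc.length : Nat) : Int) := by push_cast; ring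
      rw [this, PySem.List.pyGetD_natCast]
      simp
    have hcur : PySem.List.pyGetD l ((acc.length + 1 : Nat) : Int) 0 = b := by
      rw [PySem.List.pyGetD_natCast]
      have : l.getD (acc.length + 1) 0 = (l.drop (acc.length + 1)).getD 0 0 := by
        simp [List.getD_eq_getElem?_getD, List.getElem?_drop]
      rw [this, h]; rfl
    rw [hprev, hcur]
    have hstep : (if a + b < 0 then (acc ++ [a]) ++ [0] else (acc ++ [a]) ++ [a + b])
        = (acc ++ [a]) ++ [max 0 (a + b)] := by
      split_ifs with hneg
      · simp [max_eq_left (by omega : a + b ≤ 0)]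
      · simp [max_eq_right (by omega : (0:Int) ≤ a + b)]
    rw [hstep]
    have h2 : l.drop ((acc ++ [a]).length + 1) = r := by
      have : (acc ++ [a]).length + 1 = (acc.length + 1) + 1 := by simp
      rw [this, ← List.drop_drop, h]
      rfl
    have hcast : ((acc.length + 1 : Nat) : Int) + 1 = (((acc ++ [a]).length + 1 : Nat) : Int) := by
      simp
    rw [hcast, ih (acc ++ [a]) (max 0 (a + b)) h2]
    simp [accClamp]

-- B's staged passes realise the clamped scan: c = S - m where m ≤ 0 is the clamped running minimum
lemma alt_stages_eq_accClamp (xs : List Int) : ∀ (s m : Int), m ≤ 0 →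
    List.zipWith (fun s low => s - low) (prefixSums s xs) (runningMin m (prefixSums s xs))
      = accClamp (s - m) xs := by
  induction xs with
  | nil => intro s m _; simp [prefixSums, runningMin, accClamp]
  | cons b r ih =>
    intro s m hm
    simp only [prefixSums, runningMin, List.zipWith_cons_cons, accClamp]
    have hkey : (s + b) - min m (s + b) = max 0 (s - m + b) := by omega
    rw [ih (s + b) (min m (s + b)) (by omega), hkey]

lemma alt_eq_accClamp (x : Int) (xs : List Int) :
    cusum_alt (x :: xs) = max 0 x :: accClamp (max 0 x) xs := by
  unfold cusum_alt
  simp only [prefixSums, runningMin, List.zipWith_cons_cons]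
  have h0 : (0 : Int) + x = x := by ring
  rw [h0]
  have hm0 : min (0 : Int) x ≤ 0 := by omega
  rw [alt_stages_eq_accClamp xs x (min 0 x) hm0]
  have hkey : x - min 0 x = max 0 x := by omega
  rw [hkey]

-- ===== VERDICT (by name: the statement is the Claim_ definition above) =====
theorem cusum_spec : Claim_equal_cusum := by
  intro l _ hpre
  unfold Spec_cusum
  obtain ⟨x, xs, rfl⟩ : ∃ x xs, l = x :: xs := by
    cases l with
    | nil => exact absurd rfl hpre
    | cons x xs => exact ⟨x, xs, rfl⟩
  rw [alt_eq_accClamp]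
  have hget : PySem.List.pyGet? (x :: xs) 0 = some x := by
    simp [PySem.List.pyGet?, PySem.List.pyIdx?]
  unfold cusum
  rw [hget]
  dsimp only
  have hfirst : (if x < 0 then [(0:Int)] else [x]) = [] ++ [max 0 x] := by
    split_ifs with hx
    · simp [max_eq_left (by omega : x ≤ 0)]
    · simp [max_eq_right (by omega : (0:Int) ≤ x)]
  rw [hfirst]
  have h1 : (x :: xs).drop (([] : List Int).length + 1) = xs := rfl
  have := cusum_loop_inv (x :: xs) xs [] (max 0 x) h1
  simp only [List.length_nil] at this
  simpa using this
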